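-- pv_equiv track=rewrite | github.com/andreaciric/Advent-of-code-2025 | day4/main.py | accessible_rolls
-- ===== SOURCE A (Python) =====
-- def accessible_rolls(grid):
--
--     num_rows = len(grid)
--     num_cols = len(grid[0])
--
--     directions = [
--         (-1, -1), (-1, 0), (-1, 1),
--         ( 0, -1),          ( 0, 1),
--         ( 1, -1), ( 1, 0), ( 1, 1),
--     ]
--
--     new_grid = [row[:] for row in grid]
--     accessible_count = 0
--
--     for i in range(num_rows):
--         for j in range(num_cols):
--             if grid[i][j] == '@':
--                 neighbor_count = 0
--                 for di, dj in directions: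
--                     i2 = i + di
--                     j2 = j + dj
--                     if 0 <= i2 < num_rows and 0 <= j2 < num_cols:
--                         if grid[i2][j2] == '@':
--                             neighbor_count += 1
--                 if neighbor_count < 4:
--                     new_grid[i][j] = 'x'
--                     accessible_count += 1
--
--     return new_grid, accessible_count
-- ===== SOURCE B (Python) =====
-- def accessible_rolls(grid):
--     num_rows = len(grid)
--     num_cols = len(grid[0])
--
--     # Pass 1 (scatter): every '@' cell adds 1 to the count of each in-bounds
--     # cell of its 3x3 window except itself.  No per-cell neighbor scan is done.
--     counts = {}
--     for i in range(num_rows):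
--         for j in range(num_cols):
--             if grid[i][j] == '@':
--                 for i2 in range(i - 1, i + 2):
--                     for j2 in range(j - 1, j + 2):
--                         if (i2, j2) != (i, j) and 0 <= i2 < num_rows and 0 <= j2 < num_cols:
--                             counts[(i2, j2)] = counts.get((i2, j2), 0) + 1
--
--     # Pass 2: mark the '@' cells whose scattered count stayed below 4.
--     new_grid = [row[:] for row in grid]
--     accessible_count = 0
--     for i in range(num_rows):
--         for j in range(num_cols):
--             if grid[i][j] == '@' and counts.get((i, j), 0) < 4:
--                 new_grid[i][j] = 'x'
--                 accessible_count += 1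
--
--     return new_grid, accessible_count
-- ===== Notes on version B (the rewrite author's own statement) =====
-- stated objective: alternative
-- what changed: A gathers: for every '@' cell it scans all 8 neighbors and counts '@'s; B scatters: one pass has every '@' cell add 1 to a dict of neighbor counts, and a second pass marks '@' cells whose looked-up count is below 4.
import Mathlib
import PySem

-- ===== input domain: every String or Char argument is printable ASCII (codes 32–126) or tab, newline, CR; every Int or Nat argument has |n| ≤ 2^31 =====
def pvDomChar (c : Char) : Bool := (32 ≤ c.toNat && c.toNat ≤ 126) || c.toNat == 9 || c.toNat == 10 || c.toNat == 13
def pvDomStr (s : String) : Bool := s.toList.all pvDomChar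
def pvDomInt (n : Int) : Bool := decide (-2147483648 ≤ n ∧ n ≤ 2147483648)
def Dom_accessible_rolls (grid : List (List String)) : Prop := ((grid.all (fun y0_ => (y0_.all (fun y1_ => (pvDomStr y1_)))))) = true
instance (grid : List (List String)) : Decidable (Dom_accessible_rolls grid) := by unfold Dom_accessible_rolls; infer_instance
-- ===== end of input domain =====

-- B replaces A's per-cell 8-direction gather by a scatter pass (each '@' cell adds 1 into a
-- dict entry of every other in-bounds cell of its 3x3 window), then a lookup pass marks the
-- accessible cells (objective: alternative decomposition, same cost).

-- ===== PORT A =====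
-- A's list of the eight neighbor offsets
def pvDirs : List (Int × Int) :=
  [(-1, -1), (-1, 0), (-1, 1), (0, -1), (0, 1), (1, -1), (1, 0), (1, 1)]

-- grid[i][j]; every read in either program has indices where pyGetD is exact (loop/bounds-checked)
def pvCell (grid : List (List String)) (i j : Int) : String :=
  PySem.List.pyGetD (PySem.List.pyGetD grid i []) j ""

-- new_grid[i][j] = v; both programs only assign at loop indices 0 ≤ i, j in range, where this is exact
def pvSet2 (g : List (List String)) (i j : Int) (v : String) : List (List String) :=
  g.set i.toNat ((g.getD i.toNat []).set j.toNat v)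

def accessible_rolls (grid : List (List String)) : List (List String) × Int :=
  let num_rows : Int := (grid.length : Int)
  -- grid[0] raises IndexError on an empty grid (outside Pre_); pyGetD's [] default is unreachable inside Pre_
  let num_cols : Int := ((PySem.List.pyGetD grid 0 []).length : Int)
  let init : List (List String) × Int := (grid.map (fun row => row), 0)
  (PySem.List.pyRange 0 num_rows 1).foldl (fun st i =>
    (PySem.List.pyRange 0 num_cols 1).foldl (fun st j =>
      if pvCell grid i j = "@" then
        let neighbor_count : Int := pvDirs.foldl (fun c d =>
          if 0 ≤ i + d.1 ∧ i + d.1 < num_rows ∧ 0 ≤ j + d.2 ∧ j + d.2 < num_cols then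
            if pvCell grid (i + d.1) (j + d.2) = "@" then c + 1 else c
          else c) 0
        if neighbor_count < 4 then (pvSet2 st.1 i j "x", st.2 + 1) else st
      else st) st) init

-- ===== PORT B =====
def accessible_rolls_alt (grid : List (List String)) : List (List String) × Int :=
  let num_rows : Int := (grid.length : Int)
  let num_cols : Int := ((PySem.List.pyGetD grid 0 []).length : Int)
  -- pass 1: every '@' cell scatters +1 into each other in-bounds cell of its 3x3 window
  let counts : PySem.Dict (Int × Int) Int :=
    (PySem.List.pyRange 0 num_rows 1).foldl (fun d i =>
      (PySem.List.pyRange 0 num_cols 1).foldl (fun d j =>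
        if pvCell grid i j = "@" then
          (PySem.List.pyRange (i - 1) (i + 2) 1).foldl (fun d i2 =>
            (PySem.List.pyRange (j - 1) (j + 2) 1).foldl (fun d j2 =>
              if (i2, j2) ≠ (i, j) ∧ 0 ≤ i2 ∧ i2 < num_rows ∧ 0 ≤ j2 ∧ j2 < num_cols then
                d.insert (i2, j2) (d.getD (i2, j2) 0 + 1)
              else d) d) d
        else d) d) PySem.Dict.empty
  -- pass 2: mark '@' cells whose scattered count is below 4
  (PySem.List.pyRange 0 num_rows 1).foldl (fun st i =>
    (PySem.List.pyRange 0 num_cols 1).foldl (fun st j =>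
      if pvCell grid i j = "@" ∧ counts.getD (i, j) 0 < 4 then
        (pvSet2 st.1 i j "x", st.2 + 1)
      else st) st) (grid.map (fun row => row), 0)

-- ===== PRECONDITION & SPEC =====
-- Pre_ excludes exactly the inputs where A raises IndexError: the empty grid (grid[0]),
-- and grids with some row shorter than row 0 (grid[i][j] for j < len(grid[0])).
def Pre_accessible_rolls (grid : List (List String)) : Prop :=
  grid ≠ [] ∧ ∀ row ∈ grid, (grid.headD []).length ≤ row.length
instance (grid : List (List String)) : Decidable (Pre_accessible_rolls grid) := by
  unfold Pre_accessible_rolls; infer_instance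

def pvWitness_accessible_rolls : List (List String) :=
  [["@", ".", "@"], ["@", "@", "."], [".", "@", "@"]]

def Spec_accessible_rolls (grid : List (List String)) (out : List (List String) × Int) : Prop := out = accessible_rolls_alt grid
instance (grid : List (List String)) (out : List (List String) × Int) : Decidable (Spec_accessible_rolls grid out) := by unfold Spec_accessible_rolls; infer_instance

-- ===== CLAIM (what is proved, stated in full; the proofs are below) =====
def Claim_equal_accessible_rolls : Prop := ∀ (grid : List (List String)), Dom_accessible_rolls grid → Pre_accessible_rolls grid → Spec_accessible_rolls grid (accessible_rolls grid)

-- ===== LEMMAS AND PROOFS =====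

-- the cells a given '@' cell at (i, j) scatters into, in B's window order
def pvTgts (R C i j : Int) : List (Int × Int) :=
  ((PySem.List.pyRange (i - 1) (i + 2) 1).flatMap (fun i2 =>
     (PySem.List.pyRange (j - 1) (j + 2) 1).map (fun j2 => (i2, j2)))).filter
    (fun c => decide ((c ≠ (i, j)) ∧ 0 ≤ c.1 ∧ c.1 < R ∧ 0 ≤ c.2 ∧ c.2 < C))

-- all scatter targets of the whole grid, with multiplicity
def pvBig (grid : List (List String)) (R C : Int) : List (Int × Int) :=
  (PySem.List.pyRange 0 R 1).flatMap (fun i =>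
    (PySem.List.pyRange 0 C 1).flatMap (fun j =>
      if pvCell grid i j = "@" then pvTgts R C i j else []))

-- all in-bounds cells
def pvAllCells (R C : Int) : List (Int × Int) :=
  (PySem.List.pyRange 0 R 1).flatMap (fun i =>
    (PySem.List.pyRange 0 C 1).map (fun j => (i, j)))

-- the gather predicate at (i, j): direction dd sees an in-bounds '@' neighbor
def pvGP (grid : List (List String)) (R C i j : Int) (dd : Int × Int) : Bool :=
  decide (0 ≤ i + dd.1 ∧ i + dd.1 < R ∧ 0 ≤ j + dd.2 ∧ j + dd.2 < C ∧
          pvCell grid (i + dd.1) (j + dd.2) = "@")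

lemma pvSumIte {α : Type} (p : α → Bool) (l : List α) :
    (l.map (fun x => if p x = true then 1 else 0)).sum = l.countP p := by
  induction l with
  | nil => rfl
  | cons x xs ih => by_cases h : p x <;> simp [h, ih, Nat.add_comm]

lemma pvSumPoint (l : List Int) (hl : l.Nodup) (x : Int) (K : Nat) :
    (l.map (fun y => if y = x then K else 0)).sum = if x ∈ l then K else 0 := by
  induction l with
  | nil => simp
  | cons h t ih =>
    rw [List.nodup_cons] at hl
    rw [List.map_cons, List.sum_cons, ih hl.2]
    by_cases hx : h = x
    · subst hx
      simp [hl.1]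
    · simp [hx, List.mem_cons, Ne.symm hx]

lemma pvCountRange (lo hi x : Int) :
    (PySem.List.pyRange lo hi 1).count x = if lo ≤ x ∧ x < hi then 1 else 0 := by
  by_cases h : lo ≤ x ∧ x < hi
  · rw [if_pos h,
      List.count_eq_one_of_mem (PySem.List.nodup_pyRange_one lo hi)
        ((PySem.List.mem_pyRange_one).2 h)]
  · rw [if_neg h, List.count_eq_zero_of_not_mem]
    rw [PySem.List.mem_pyRange_one]
    exact h

lemma pvMemDirs (x y : Int) :
    (x, y) ∈ pvDirs ↔ -1 ≤ x ∧ x ≤ 1 ∧ -1 ≤ y ∧ y ≤ 1 ∧ ¬(x = 0 ∧ y = 0) := by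
  simp [pvDirs, Prod.ext_iff]
  omega

lemma pvCountP_inter_comm {α : Type} [DecidableEq α] (l₁ l₂ : List α)
    (h₁ : l₁.Nodup) (h₂ : l₂.Nodup) (p : α → Bool) :
    l₁.countP (fun x => p x && decide (x ∈ l₂)) =
      l₂.countP (fun x => decide (x ∈ l₁) && p x) := by
  rw [List.countP_eq_length_filter, List.countP_eq_length_filter]
  refine List.Perm.length_eq ?_
  rw [List.perm_ext_iff_of_nodup (h₁.filter _) (h₂.filter _)]
  intro a
  simp only [List.mem_filter, Bool.and_eq_true, decide_eq_true_eq]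
  tauto

lemma pvMemAll (R C : Int) (c : Int × Int) :
    c ∈ pvAllCells R C ↔ 0 ≤ c.1 ∧ c.1 < R ∧ 0 ≤ c.2 ∧ c.2 < C := by
  obtain ⟨a, b⟩ := c
  unfold pvAllCells
  simp only [List.mem_flatMap, List.mem_map, PySem.List.mem_pyRange_one, Prod.mk.injEq]
  constructor
  · rintro ⟨x, hx, y, hy, rfl, rfl⟩
    exact ⟨hx.1, hx.2, hy.1, hy.2⟩
  · rintro ⟨h1, h2, h3, h4⟩
    exact ⟨a, ⟨h1, h2⟩, b, ⟨h3, h4⟩, rfl, rfl⟩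

lemma pvNodupAll (R C : Int) : (pvAllCells R C).Nodup := by
  unfold pvAllCells
  rw [List.nodup_flatMap]
  constructor
  · intro a _
    exact (PySem.List.nodup_pyRange_one 0 C).map (fun x y h => by
      simpa using congrArg Prod.snd h)
  · refine (PySem.List.pairwise_lt_pyRange_one 0 R).imp ?_
    intro a b hab c hc hc'
    simp only [List.mem_map] at hc hc'
    obtain ⟨x, _, rfl⟩ := hc
    obtain ⟨y, _, h⟩ := hc'
    have := congrArg Prod.fst h
    simp at this
    omega

lemma pvDirs_nodup : pvDirs.Nodup := by decide

lemma pvMemL (i j : Int) (c : Int × Int) :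
    c ∈ pvDirs.map (fun dd => (i - dd.1, j - dd.2)) ↔ (i - c.1, j - c.2) ∈ pvDirs := by
  obtain ⟨a, b⟩ := c
  simp only [List.mem_map]
  constructor
  · rintro ⟨dd, hdd, h⟩
    have h1 := congrArg Prod.fst h
    have h2 := congrArg Prod.snd h
    simp only at h1 h2
    have : (i - a, j - b) = dd := by
      obtain ⟨d1, d2⟩ := dd
      simp_all
      omega
    rwa [this]
  · intro h
    refine ⟨(i - a, j - b), h, ?_⟩
    simp

lemma pvL_nodup (i j : Int) : (pvDirs.map (fun dd => (i - dd.1, j - dd.2))).Nodup := by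
  refine List.Nodup.map_on ?_ pvDirs_nodup
  rintro ⟨x1, x2⟩ _ ⟨y1, y2⟩ _ h
  have h1 := congrArg Prod.fst h
  have h2 := congrArg Prod.snd h
  simp only [Prod.mk.injEq] at *
  omega

-- how often cell (i, j) occurs in the raw 3x3 window around (a, b)
lemma pvW_count (a b i j : Int) :
    ((PySem.List.pyRange (a - 1) (a + 2) 1).flatMap (fun i2 =>
       (PySem.List.pyRange (b - 1) (b + 2) 1).map (fun j2 => (i2, j2)))).count (i, j)
      = if a - 1 ≤ i ∧ i < a + 2 ∧ b - 1 ≤ j ∧ j < b + 2 then 1 else 0 := by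
  rw [List.count_flatMap]
  have hpt : ∀ i2 : Int,
      ((PySem.List.pyRange (b - 1) (b + 2) 1).map (fun j2 => (i2, j2))).count (i, j)
        = if i2 = i then (if b - 1 ≤ j ∧ j < b + 2 then 1 else 0) else 0 := by
    intro i2
    by_cases hi2 : i2 = i
    · subst hi2
      rw [if_pos rfl, ← pvCountRange (b - 1) (b + 2) j]
      exact List.count_map_of_injective _ _ (fun x y hxy => by simpa using hxy) j
    · rw [if_neg hi2, List.count_eq_zero_of_not_mem]
      intro hm
      obtain ⟨y, _, hy⟩ := List.mem_map.1 hm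
      exact hi2 (by simpa using congrArg Prod.fst hy)
  simp only [Function.comp_def]
  rw [List.map_congr_left (fun i2 _ => hpt i2)]
  rw [pvSumPoint _ (PySem.List.nodup_pyRange_one (a - 1) (a + 2)) i _]
  simp only [PySem.List.mem_pyRange_one]
  split_ifs <;> omega

lemma pvTgts_count (R C i j a b : Int)
    (hi0 : 0 ≤ i) (hiR : i < R) (hj0 : 0 ≤ j) (hjC : j < C) :
    (pvTgts R C a b).count (i, j) = if (i - a, j - b) ∈ pvDirs then 1 else 0 := by
  unfold pvTgts
  by_cases hp : ((i, j) ≠ (a, b)) ∧ 0 ≤ i ∧ i < R ∧ 0 ≤ j ∧ j < C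
  · rw [List.count_filter
        (p := fun c => decide (c ≠ (a, b) ∧ 0 ≤ c.1 ∧ c.1 < R ∧ 0 ≤ c.2 ∧ c.2 < C))
        (by exact decide_eq_true hp), pvW_count]
    have hne : ¬(i = a ∧ j = b) := by
      intro h
      exact hp.1 (by simp [h.1, h.2])
    simp only [pvMemDirs]
    split_ifs <;> omega
  · have heq : i = a ∧ j = b := by
      by_contra hne
      exact hp ⟨fun hpair => hne (by simpa [Prod.ext_iff] using hpair), hi0, hiR, hj0, hjC⟩
    rw [List.count_eq_zero_of_not_mem, if_neg]
    · simp only [pvMemDirs]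
      omega
    · intro hmem
      exact hp (of_decide_eq_true (List.mem_filter.1 hmem).2)

lemma pvCounts_eq_big (grid : List (List String)) (R C : Int) (v : Int × Int) :
    ((PySem.List.pyRange 0 R 1).foldl (fun d i =>
      (PySem.List.pyRange 0 C 1).foldl (fun d j =>
        if pvCell grid i j = "@" then
          (PySem.List.pyRange (i - 1) (i + 2) 1).foldl (fun d i2 =>
            (PySem.List.pyRange (j - 1) (j + 2) 1).foldl (fun d j2 =>
              if (i2, j2) ≠ (i, j) ∧ 0 ≤ i2 ∧ i2 < R ∧ 0 ≤ j2 ∧ j2 < C then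
                d.insert (i2, j2) (d.getD (i2, j2) 0 + 1)
              else d) d) d
        else d) d) PySem.Dict.empty).getD v 0 = ((pvBig grid R C).count v : Int) := by
  have h : ((PySem.List.pyRange 0 R 1).foldl (fun d i =>
      (PySem.List.pyRange 0 C 1).foldl (fun d j =>
        if pvCell grid i j = "@" then
          (PySem.List.pyRange (i - 1) (i + 2) 1).foldl (fun d i2 =>
            (PySem.List.pyRange (j - 1) (j + 2) 1).foldl (fun d j2 =>
              if (i2, j2) ≠ (i, j) ∧ 0 ≤ i2 ∧ i2 < R ∧ 0 ≤ j2 ∧ j2 < C then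
                d.insert (i2, j2) (d.getD (i2, j2) 0 + 1)
              else d) d) d
        else d) d) (PySem.Dict.empty : PySem.Dict (Int × Int) Int))
      = (pvBig grid R C).foldl (fun d t => d.insert t (d.getD t 0 + 1))
          (PySem.Dict.empty : PySem.Dict (Int × Int) Int) := by
    unfold pvBig
    rw [List.foldl_flatMap]
    refine PySem.List.foldl_congr_mem _ _ _ _ ?_
    intro d i _
    rw [List.foldl_flatMap]
    refine PySem.List.foldl_congr_mem _ _ _ _ ?_
    intro d' j _
    by_cases hc : pvCell grid i j = "@"
    · simp only [hc, if_pos]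
      unfold pvTgts
      rw [List.foldl_filter, List.foldl_flatMap]
      refine PySem.List.foldl_congr_mem _ _ _ _ ?_
      intro d'' i2 _
      rw [List.foldl_map]
      refine PySem.List.foldl_congr_mem _ _ _ _ ?_
      intro d''' j2 _
      simp only [decide_eq_true_eq]
    · simp [hc]
  refine (congrArg (fun d => PySem.Dict.getD d v 0) h).trans ?_
  rw [PySem.Dict.getD_foldl_insert_add_one]
  simp

lemma pvBig_count_eq_gather (grid : List (List String)) (R C i j : Int)
    (hi0 : 0 ≤ i) (hiR : i < R) (hj0 : 0 ≤ j) (hjC : j < C) :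
    ((pvBig grid R C).count (i, j) : Int) =
      pvDirs.foldl (fun c d =>
        if 0 ≤ i + d.1 ∧ i + d.1 < R ∧ 0 ≤ j + d.2 ∧ j + d.2 < C then
          if pvCell grid (i + d.1) (j + d.2) = "@" then c + 1 else c
        else c) 0 := by
  -- the gather loop is a countP over pvDirs
  have hg : pvDirs.foldl (fun c d =>
        if 0 ≤ i + d.1 ∧ i + d.1 < R ∧ 0 ≤ j + d.2 ∧ j + d.2 < C then
          if pvCell grid (i + d.1) (j + d.2) = "@" then c + 1 else c
        else c) 0 = ((pvDirs.countP (pvGP grid R C i j) : Nat) : Int) := by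
    have h0 : List.foldl (fun acc x => if pvGP grid R C i j x = true then acc + 1 else acc)
        0 pvDirs = ((pvDirs.countP (pvGP grid R C i j) : Nat) : Int) := by
      simpa using PySem.List.foldl_count_if (pvGP grid R C i j) pvDirs 0
    refine Eq.trans ?_ h0
    refine PySem.List.foldl_congr_mem _ _ _ _ ?_
    intro c dd _
    unfold pvGP
    by_cases hb : 0 ≤ i + dd.1 ∧ i + dd.1 < R ∧ 0 ≤ j + dd.2 ∧ j + dd.2 < C
    · by_cases hcell : pvCell grid (i + dd.1) (j + dd.2) = "@" <;>
        simp [hb, hcell]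
    · simp only [decide_eq_true_eq]
      rw [if_neg hb, if_neg (by tauto)]
  rw [hg]
  congr 1
  -- step 1: count over pvBig as a double sum of indicators
  have h1 : (pvBig grid R C).count (i, j) =
      ((PySem.List.pyRange 0 R 1).map (fun a =>
        ((PySem.List.pyRange 0 C 1).map (fun b =>
          if (fun c : Int × Int => decide (pvCell grid c.1 c.2 = "@" ∧
              (i - c.1, j - c.2) ∈ pvDirs)) (a, b) = true then 1 else 0)).sum)).sum := by
    unfold pvBig
    rw [List.count_flatMap]
    congr 1
    refine List.map_congr_left ?_
    intro a _
    simp only [Function.comp_def]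
    rw [List.count_flatMap]
    congr 1
    refine List.map_congr_left ?_
    intro b _
    simp only [Function.comp_def]
    by_cases hc : pvCell grid a b = "@"
    · rw [if_pos hc]
      rw [pvTgts_count R C i j a b hi0 hiR hj0 hjC]
      by_cases hm : (i - a, j - b) ∈ pvDirs <;> simp [hm, hc]
    · rw [if_neg hc]
      simp [hc]
  -- step 2: the double sum is a countP over all cells
  have h2 : ((PySem.List.pyRange 0 R 1).map (fun a =>
        ((PySem.List.pyRange 0 C 1).map (fun b =>
          if (fun c : Int × Int => decide (pvCell grid c.1 c.2 = "@" ∧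
              (i - c.1, j - c.2) ∈ pvDirs)) (a, b) = true then 1 else 0)).sum)).sum =
      (pvAllCells R C).countP (fun c : Int × Int => decide (pvCell grid c.1 c.2 = "@" ∧
              (i - c.1, j - c.2) ∈ pvDirs)) := by
    unfold pvAllCells
    rw [List.countP_flatMap]
    congr 1
    refine List.map_congr_left ?_
    intro a _
    simp only [Function.comp_def]
    rw [List.countP_map]
    rw [pvSumIte]
    rfl
  have hperm : (pvDirs.map (fun dd : Int × Int => (-dd.1, -dd.2))).Perm pvDirs := by decide
  rw [h1, h2]
  -- step 3: swap which side of the adjacency is enumerated (double counting),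
  -- then walk back from marked cells to directions and flip each direction
  refine Eq.trans (List.countP_congr ?_) (Eq.trans
    (pvCountP_inter_comm (pvAllCells R C) (pvDirs.map (fun dd => (i - dd.1, j - dd.2)))
      (pvNodupAll R C) (pvL_nodup i j) (fun c : Int × Int => decide (pvCell grid c.1 c.2 = "@")))
    ?_)
  · intro c _
    simp only [Bool.and_eq_true, decide_eq_true_eq, pvMemL]
  · refine Eq.trans List.countP_map ?_
    refine Eq.trans (((List.Perm.countP_eq _ hperm).symm : _)) ?_
    refine Eq.trans List.countP_map ?_
    refine List.countP_congr ?_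
    rintro ⟨d1, d2⟩ _
    simp only [Function.comp_def, pvGP, Bool.and_eq_true, decide_eq_true_eq, pvMemAll]
    have e1 : i - -d1 = i + d1 := by omega
    have e2 : j - -d2 = j + d2 := by omega
    rw [e1, e2]
    tauto

-- ===== VERDICT (by name: the statement is the Claim_ definition above) =====
theorem accessible_rolls_spec : Claim_equal_accessible_rolls := by
  intro grid _ _
  unfold Spec_accessible_rolls accessible_rolls accessible_rolls_alt
  apply PySem.List.foldl_congr_mem
  intro st i hi
  apply PySem.List.foldl_congr_mem
  intro st' j hj
  rw [PySem.List.mem_pyRange_one] at hi hj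
  rw [pvCounts_eq_big, pvBig_count_eq_gather grid _ _ i j hi.1 hi.2 hj.1 hj.2]
  by_cases hc : pvCell grid i j = "@" <;> simp [hc]
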